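-- pv_equiv track=rewrite | github.com/StreakyFly/advent-of-code | 2023/day10.py | get_inside_points
-- ===== SOURCE A (Python) =====
-- def get_inside_points(sketch, loop):
--     inside_points = []
--     for y, row in enumerate(sketch):
--         prev_corner = None
--         crossings = 0
--         for x, col in enumerate(row):
--             if (x, y) in loop:
--                 match col:
--                     case "|":
--                         crossings += 1
--                     case "7":
--                         if prev_corner == "L":
--                             crossings += 1
--                     case "J":
--                         if prev_corner == "F":
--                             crossings += 1
--                     case "S":
--                         crossings += 1
--                 if col != "-":
--                     prev_corner = col
--             else:
--                 if crossings % 2 == 1: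
--                     inside_points.append((x, y))
--     return inside_points
-- ===== SOURCE B (Python) =====
-- def get_inside_points(sketch, loop):
--     loop_set = set(loop)
--     inside_points = []
--     for y, row in enumerate(sketch):
--         corners = [(x, c) for x, c in enumerate(row)
--                    if (x, y) in loop_set and c != '-']
--         inc_xs = {x for x, c in corners if c in ('|', 'S')}
--         inc_xs |= {x2 for (_, a), (x2, b) in zip(corners, corners[1:])
--                    if (a, b) in (('L', '7'), ('F', 'J'))}
--         crossings = 0
--         for x in range(len(row)):
--             if x in inc_xs:
--                 crossings += 1
--             if (x, y) not in loop_set and crossings % 2 == 1: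
--                 inside_points.append((x, y))
--     return inside_points
-- ===== Notes on version B (the rewrite author's own statement) =====
-- stated objective: alternative
-- what changed: B removes A's prev_corner state machine: per row it precomputes the set of crossing columns (cells with '|' or 'S', plus the second cell of each adjacent corner pair L..7 / F..J found by zipping the filtered corner list) and then does one prefix-parity pass over the row.
import Mathlib
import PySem

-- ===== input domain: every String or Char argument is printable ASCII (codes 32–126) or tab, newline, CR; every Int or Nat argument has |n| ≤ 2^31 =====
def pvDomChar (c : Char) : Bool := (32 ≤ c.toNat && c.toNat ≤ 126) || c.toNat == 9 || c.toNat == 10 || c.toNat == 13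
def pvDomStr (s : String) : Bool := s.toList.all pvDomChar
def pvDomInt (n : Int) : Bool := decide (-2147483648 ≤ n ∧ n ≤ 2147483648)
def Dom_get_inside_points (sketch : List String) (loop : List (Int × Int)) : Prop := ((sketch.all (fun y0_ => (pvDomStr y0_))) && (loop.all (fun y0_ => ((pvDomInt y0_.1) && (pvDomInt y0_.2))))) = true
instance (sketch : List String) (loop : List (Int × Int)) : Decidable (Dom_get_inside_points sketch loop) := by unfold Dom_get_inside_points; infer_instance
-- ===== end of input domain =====

-- B removes A's prev_corner state machine: per row it precomputes the set of crossing columns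
-- ('|'/'S' cells and adjacent L..7 / F..J corner pairs found by zipping the corner list), then one parity pass.


-- ===== PORT A =====
-- inner loop of A over one row: state (prev_corner, crossings) and the shared inside_points accumulator
def pvArow (loop : List (Int × Int)) (y : Int) : List Char → Int → Option Char → Int → List (Int × Int) → List (Int × Int)
  | [], _, _, _, acc => acc
  | c :: cs, x, prev, cr, acc =>
    if (x, y) ∈ loop then
      let cr' := if c = '|' then cr + 1
        else if c = '7' then (if prev = some 'L' then cr + 1 else cr)
        else if c = 'J' then (if prev = some 'F' then cr + 1 else cr)
        else if c = 'S' then cr + 1 else cr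
      let prev' := if c ≠ '-' then some c else prev
      pvArow loop y cs (x + 1) prev' cr' acc
    else
      pvArow loop y cs (x + 1) prev cr
        (if PySem.Int.mod cr 2 = 1 then acc ++ [(x, y)] else acc)

def get_inside_points (sketch : List String) (loop : List (Int × Int)) : List (Int × Int) :=
  (PySem.List.enumerate sketch).foldl
    (fun acc (p : Int × String) => pvArow loop p.1 p.2.toList 0 none 0 acc) []

-- ===== PORT B =====
-- corners = [(x, c) for x, c in enumerate(row) if (x, y) in loop_set and c != '-']
def pvCorners (ls : PySem.Set (Int × Int)) (y : Int) (row : List Char) : List (Int × Char) :=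
  (PySem.List.enumerate row).filterMap
    (fun p => if (p.1, y) ∈ ls ∧ p.2 ≠ '-' then some p else none)

-- inc_xs = {x for '|'/'S' corners} | {x2 for adjacent corner pairs ('L','7') / ('F','J')}
def pvIncXs (corners : List (Int × Char)) : PySem.Set Int :=
  PySem.Set.union
    (PySem.Set.ofList (corners.filterMap
      (fun p => if p.2 = '|' ∨ p.2 = 'S' then some p.1 else none)))
    ((corners.zip corners.tail).filterMap
      (fun q => if (q.1.2 = 'L' ∧ q.2.2 = '7') ∨ (q.1.2 = 'F' ∧ q.2.2 = 'J') then some q.2.1 else none))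

-- for x in range(len(row)): bump crossings on inc_xs, append non-loop cells at odd parity
def pvBrow (ls : PySem.Set (Int × Int)) (y : Int) (incxs : PySem.Set Int)
    (row : List Char) (acc : List (Int × Int)) : List (Int × Int) :=
  ((PySem.List.pyRange 0 (PySem.List.len row) 1).foldl
    (fun (st : Int × List (Int × Int)) x =>
      let cr := if x ∈ incxs then st.1 + 1 else st.1
      let acc := if (x, y) ∉ ls ∧ PySem.Int.mod cr 2 = 1 then st.2 ++ [(x, y)] else st.2
      (cr, acc)) (0, acc)).2

def get_inside_points_alt (sketch : List String) (loop : List (Int × Int)) : List (Int × Int) :=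
  let ls := PySem.Set.ofList loop
  (PySem.List.enumerate sketch).foldl
    (fun acc (p : Int × String) =>
      let corners := pvCorners ls p.1 p.2.toList
      pvBrow ls p.1 (pvIncXs corners) p.2.toList acc) []

-- ===== PRECONDITION & SPEC =====
def Spec_get_inside_points (sketch : List String) (loop : List (Int × Int)) (out : List (Int × Int)) : Prop := out = get_inside_points_alt sketch loop
instance (sketch : List String) (loop : List (Int × Int)) (out : List (Int × Int)) : Decidable (Spec_get_inside_points sketch loop out) := by unfold Spec_get_inside_points; infer_instance

-- ===== CLAIM (what is proved, stated in full; the proofs are below) =====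
def Claim_equal_get_inside_points : Prop := ∀ (sketch : List String) (loop : List (Int × Int)), Dom_get_inside_points sketch loop → Spec_get_inside_points sketch loop (get_inside_points sketch loop)

-- ===== LEMMAS AND PROOFS =====

-- reference characterisation of the crossing columns of one row (A's state machine, emitting positions)
def pvIncR (loop : List (Int × Int)) (y : Int) : List Char → Int → Option Char → List Int
  | [], _, _ => []
  | c :: cs, x, prev =>
    if (x, y) ∈ loop then
      (if c = '|' ∨ c = 'S' ∨ (c = '7' ∧ prev = some 'L') ∨ (c = 'J' ∧ prev = some 'F')
        then [x] else []) ++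
      pvIncR loop y cs (x + 1) (if c = '-' then prev else some c)
    else pvIncR loop y cs (x + 1) prev

-- pvCorners with an arbitrary start index and membership stated against loop itself
def pvCornersFrom (loop : List (Int × Int)) (y : Int) (cs : List Char) (s : Int) : List (Int × Char) :=
  (PySem.List.enumerate cs s).filterMap
    (fun p => if (p.1, y) ∈ loop ∧ p.2 ≠ '-' then some p else none)

-- recursion computing the pair part of pvIncXs with an explicit previous-corner character
def pvPairs (prev : Option Char) : List (Int × Char) → List Int
  | [] => []
  | (x, c) :: rest =>
    (if (prev = some 'L' ∧ c = '7') ∨ (prev = some 'F' ∧ c = 'J') then [x] else []) ++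
    pvPairs (some c) rest

theorem pvCornersFrom_cons (loop : List (Int × Int)) (y : Int) (c : Char) (cs : List Char) (s : Int) :
    pvCornersFrom loop y (c :: cs) s =
      (if (s, y) ∈ loop ∧ c ≠ '-' then [(s, c)] else []) ++ pvCornersFrom loop y cs (s + 1) := by
  rw [pvCornersFrom, PySem.List.enumerate_cons, List.filterMap_cons, pvCornersFrom]
  split <;> simp_all

theorem pvIncR_ge (loop : List (Int × Int)) (y : Int) :
    ∀ (cs : List Char) (x : Int) (prev : Option Char) (j : Int),
      j ∈ pvIncR loop y cs x prev → x ≤ j := by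
  intro cs
  induction cs with
  | nil => intro x prev j h; simp [pvIncR] at h
  | cons c cs ih =>
    intro x prev j h
    by_cases hm : (x, y) ∈ loop
    · rw [pvIncR, if_pos hm] at h
      rcases List.mem_append.mp h with h | h
      · split at h <;> simp_all
      · have := ih (x + 1) _ j h; omega
    · rw [pvIncR, if_neg hm] at h
      have := ih (x + 1) _ j h; omega

theorem pvZip_eq_pvPairs :
    ∀ (L : List (Int × Char)),
      (L.zip L.tail).filterMap
        (fun q => if (q.1.2 = 'L' ∧ q.2.2 = '7') ∨ (q.1.2 = 'F' ∧ q.2.2 = 'J') then some q.2.1 else none)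
      = pvPairs none L := by
  have aux : ∀ (L : List (Int × Char)) (a : Int × Char),
      ((a :: L).zip L).filterMap
        (fun q => if (q.1.2 = 'L' ∧ q.2.2 = '7') ∨ (q.1.2 = 'F' ∧ q.2.2 = 'J') then some q.2.1 else none)
      = pvPairs (some a.2) L := by
    intro L
    induction L with
    | nil => intro a; rfl
    | cons b r ih =>
      intro a
      simp only [List.zip_cons_cons, List.filterMap_cons, pvPairs, ih b]
      split <;> simp_all
  intro L
  cases L with
  | nil => rfl
  | cons a rest =>
    simp only [List.tail_cons, aux rest a, pvPairs]
    simp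

theorem pvIncR_char (loop : List (Int × Int)) (y : Int) :
    ∀ (cs : List Char) (s : Int) (prev : Option Char) (j : Int),
      j ∈ pvIncR loop y cs s prev ↔
        (j ∈ (pvCornersFrom loop y cs s).filterMap
              (fun p => if p.2 = '|' ∨ p.2 = 'S' then some p.1 else none)
          ∨ j ∈ pvPairs prev (pvCornersFrom loop y cs s)) := by
  intro cs
  induction cs with
  | nil =>
    intro s prev j
    simp [pvIncR, pvCornersFrom, PySem.List.enumerate_nil, pvPairs]
  | cons c cs ih =>
    intro s prev j
    rw [pvIncR, pvCornersFrom_cons]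
    by_cases hm : (s, y) ∈ loop
    · by_cases hc : c = '-'
      · subst hc
        rw [if_pos hm, if_neg (by simp : ¬((s, y) ∈ loop ∧ ('-' : Char) ≠ '-')),
            if_neg (by simp : ¬(('-' : Char) = '|' ∨ ('-' : Char) = 'S' ∨ ('-' : Char) = '7' ∧ prev = some 'L' ∨ ('-' : Char) = 'J' ∧ prev = some 'F'))]
        simpa using ih (s + 1) prev j
      · rw [if_pos hm, if_pos (show (s, y) ∈ loop ∧ c ≠ '-' from ⟨hm, hc⟩), if_neg hc]
        simp only [List.singleton_append, List.filterMap_cons, pvPairs, List.mem_append,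
          ih (s + 1) (some c) j]
        by_cases h1 : c = '|' <;> by_cases h2 : c = 'S' <;> by_cases h3 : c = '7' <;>
          by_cases h4 : c = 'J' <;> by_cases h5 : prev = some 'L' <;>
          by_cases h6 : prev = some 'F' <;> simp_all [or_assoc, or_left_comm, or_comm]
    · rw [if_neg hm, if_neg (by tauto : ¬((s, y) ∈ loop ∧ c ≠ '-'))]
      simpa using ih (s + 1) prev j

-- the fold body of pvBrow, named for the proofs (identical term; pvBrow_eq below is rfl)
def pvStep (loop : List (Int × Int)) (y : Int) (INC : PySem.Set Int)
    (st : Int × List (Int × Int)) (x : Int) : Int × List (Int × Int) :=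
  let cr := if x ∈ INC then st.1 + 1 else st.1
  let acc := if (x, y) ∉ PySem.Set.ofList loop ∧ PySem.Int.mod cr 2 = 1 then st.2 ++ [(x, y)] else st.2
  (cr, acc)

theorem pvBrow_eq (loop : List (Int × Int)) (y : Int) (INC : PySem.Set Int)
    (row : List Char) (acc : List (Int × Int)) :
    pvBrow (PySem.Set.ofList loop) y INC row acc
      = ((PySem.List.pyRange 0 (PySem.List.len row) 1).foldl (pvStep loop y INC) (0, acc)).2 := rfl

theorem pvCrossStep (c : Char) (prev : Option Char) (cr : Int) :
    (if c = '|' then cr + 1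
      else if c = '7' then (if prev = some 'L' then cr + 1 else cr)
      else if c = 'J' then (if prev = some 'F' then cr + 1 else cr)
      else if c = 'S' then cr + 1 else cr)
    = if (c = '|' ∨ c = 'S' ∨ (c = '7' ∧ prev = some 'L') ∨ (c = 'J' ∧ prev = some 'F'))
        then cr + 1 else cr := by
  split_ifs <;> simp_all

theorem pvMain (loop : List (Int × Int)) (y : Int) (INC : PySem.Set Int) :
    ∀ (cs : List Char) (s : Int) (prev : Option Char) (cr : Int) (acc : List (Int × Int)),
      (∀ j, s ≤ j → (j ∈ INC ↔ j ∈ pvIncR loop y cs s prev)) →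
      ((PySem.List.pyRange s (s + cs.length) 1).foldl (pvStep loop y INC) (cr, acc)).2
      = pvArow loop y cs s prev cr acc := by
  intro cs
  induction cs with
  | nil =>
    intro s prev cr acc _
    rw [show s + (([] : List Char).length : Int) = s by simp, PySem.List.pyRange_one_eq_nil le_rfl]
    rfl
  | cons c cs ih =>
    intro s prev cr acc H
    have hlen0 : (0 : Int) ≤ (cs.length : Int) := Int.natCast_nonneg _
    rw [show s + (((c :: cs).length : Nat) : Int) = (s + 1) + (cs.length : Int) by push_cast [List.length_cons]; omega]
    rw [PySem.List.pyRange_one_cons (by omega), List.foldl_cons]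
    by_cases hm : (s, y) ∈ loop
    · have hsin : s ∈ INC ↔ (c = '|' ∨ c = 'S' ∨ (c = '7' ∧ prev = some 'L') ∨ (c = 'J' ∧ prev = some 'F')) := by
        rw [H s le_rfl, pvIncR, if_pos hm]
        simp only [List.mem_append]
        constructor
        · rintro (h | h)
          · split at h <;> simp_all
          · exact absurd (pvIncR_ge loop y _ _ _ _ h) (by omega)
        · intro h; left; rw [if_pos h]; simp
      have H' : ∀ j, s + 1 ≤ j →
          (j ∈ INC ↔ j ∈ pvIncR loop y cs (s + 1) (if c = '-' then prev else some c)) := by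
        intro j hj
        rw [H j (by omega), pvIncR, if_pos hm]
        simp only [List.mem_append]
        constructor
        · rintro (h | h)
          · split at h <;> simp_all
          · exact h
        · intro h; right; exact h
      rw [pvArow, if_pos hm]
      rw [pvCrossStep]
      have hprev : (if c ≠ '-' then some c else prev) = (if c = '-' then prev else some c) := by
        by_cases hc : c = '-' <;> simp [hc]
      rw [hprev]
      by_cases hf : (c = '|' ∨ c = 'S' ∨ (c = '7' ∧ prev = some 'L') ∨ (c = 'J' ∧ prev = some 'F'))
      · rw [if_pos hf]
        rw [show pvStep loop y INC (cr, acc) s = (cr + 1, acc) from by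
          simp [pvStep, hsin.mpr hf, PySem.Set.mem_ofList, hm]]
        exact ih (s + 1) _ (cr + 1) acc H'
      · rw [if_neg hf]
        have hns : s ∉ INC := fun h => hf (hsin.mp h)
        rw [show pvStep loop y INC (cr, acc) s = (cr, acc) from by
          simp [pvStep, hns, PySem.Set.mem_ofList, hm]]
        exact ih (s + 1) _ cr acc H'
    · have hns : s ∉ INC := by
        intro h
        have h2 := (H s le_rfl).mp h
        rw [pvIncR, if_neg hm] at h2
        exact absurd (pvIncR_ge loop y _ _ _ _ h2) (by omega)
      have H' : ∀ j, s + 1 ≤ j → (j ∈ INC ↔ j ∈ pvIncR loop y cs (s + 1) prev) := by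
        intro j hj
        rw [H j (by omega), pvIncR, if_neg hm]
      rw [pvArow, if_neg hm]
      rw [show pvStep loop y INC (cr, acc) s
            = (cr, if PySem.Int.mod cr 2 = 1 then acc ++ [(s, y)] else acc) from by
        simp [pvStep, hns, PySem.Set.mem_ofList, hm]]
      exact ih (s + 1) prev cr _ H'

theorem pvRow_eq (loop : List (Int × Int)) (y : Int) (row : List Char) (acc : List (Int × Int)) :
    pvBrow (PySem.Set.ofList loop) y
      (pvIncXs (pvCorners (PySem.Set.ofList loop) y row)) row acc
    = pvArow loop y row 0 none 0 acc := by
  have hcf : pvCorners (PySem.Set.ofList loop) y row = pvCornersFrom loop y row 0 := by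
    simp [pvCorners, pvCornersFrom, PySem.Set.mem_ofList]
  have Hfull : ∀ j : Int, 0 ≤ j →
      (j ∈ pvIncXs (pvCorners (PySem.Set.ofList loop) y row) ↔ j ∈ pvIncR loop y row 0 none) := by
    intro j _
    rw [pvIncXs, hcf, PySem.Set.mem_union, PySem.Set.mem_ofList, pvZip_eq_pvPairs,
      pvIncR_char loop y row 0 none j]
  rw [pvBrow_eq, PySem.List.len_eq, show ((row.length : Nat) : Int) = 0 + (row.length : Int) by omega]
  exact pvMain loop y _ row 0 none 0 acc Hfull

theorem pvRows (loop : List (Int × Int)) :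
    ∀ (rows : List String) (y0 : Int) (acc : List (Int × Int)),
      (PySem.List.enumerate rows y0).foldl
        (fun acc (p : Int × String) =>
          pvBrow (PySem.Set.ofList loop) p.1
            (pvIncXs (pvCorners (PySem.Set.ofList loop) p.1 p.2.toList)) p.2.toList acc) acc
      = (PySem.List.enumerate rows y0).foldl
          (fun acc (p : Int × String) => pvArow loop p.1 p.2.toList 0 none 0 acc) acc := by
  intro rows
  induction rows with
  | nil => intro y0 acc; rfl
  | cons r rows ih =>
    intro y0 acc
    rw [PySem.List.enumerate_cons, List.foldl_cons, List.foldl_cons]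
    rw [pvRow_eq loop y0 r.toList acc]
    exact ih (y0 + 1) _

-- ===== VERDICT (by name: the statement is the Claim_ definition above) =====
theorem get_inside_points_spec : Claim_equal_get_inside_points := by
  intro sketch loop _
  show get_inside_points sketch loop = get_inside_points_alt sketch loop
  rw [get_inside_points, get_inside_points_alt]
  exact (pvRows loop sketch 0 []).symm
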